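-- pv_equiv track=rewrite | github.com/fireae/Split_Merge_table_recognition | data_utils/Merge_data.py | find_connected_line
-- ===== SOURCE A (Python) =====
-- def find_connected_line(lines, threshold=5):
--     """
--     Gets center of lines.
--
--     Args:
--         lines(list): A vector indicates position of lines.
--         threshold(int): Threshold for filtering lines that too close to the border.
--     """
--     length = len(lines)
--     i = 0
--     blocks = []
--
--     def find_end(start):
--         end = length - 1
--         for j in range(start, length - 1):
--             if lines[j + 1] == 0:
--                 end = j
--                 break
--         return end
--
--     while i < length:
--         if lines[i] == 0:
--             i += 1
--         else:
--             end = find_end(i)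
--             blocks.append((i, end))
--             i = end + 1
--     if len(blocks) > 0:
--         if blocks[0][0] <= threshold:
--             blocks.pop(0)
--     if len(blocks) > 0:
--         if (length - blocks[-1][1]) <= threshold:
--             blocks.pop(-1)
--     lines_position = [int((x[0] + x[1]) / 2) for x in blocks]
--     return lines_position
-- ===== SOURCE B (Python) =====
-- def find_connected_line(lines, threshold=5):
--     """Single left-to-right pass: extend the current run or open a new one,
--     then apply the two border trims."""
--     blocks = []
--     prev = False
--     for i, v in enumerate(lines):
--         if v != 0:
--             if prev:
--                 blocks[-1] = (blocks[-1][0], i)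
--             else:
--                 blocks.append((i, i))
--         prev = v != 0
--     if blocks and blocks[0][0] <= threshold:
--         del blocks[0]
--     if blocks and len(lines) - blocks[-1][1] <= threshold:
--         del blocks[-1]
--     return [(s + e) // 2 for s, e in blocks]
-- ===== Notes on version B (the rewrite author's own statement) =====
-- stated objective: simpler
-- what changed: Replaces A's while-loop with index jumps and a nested find_end scan by a single enumerate pass that opens or extends the current nonzero run, keeping the same two border trims and centres.
import Mathlib
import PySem

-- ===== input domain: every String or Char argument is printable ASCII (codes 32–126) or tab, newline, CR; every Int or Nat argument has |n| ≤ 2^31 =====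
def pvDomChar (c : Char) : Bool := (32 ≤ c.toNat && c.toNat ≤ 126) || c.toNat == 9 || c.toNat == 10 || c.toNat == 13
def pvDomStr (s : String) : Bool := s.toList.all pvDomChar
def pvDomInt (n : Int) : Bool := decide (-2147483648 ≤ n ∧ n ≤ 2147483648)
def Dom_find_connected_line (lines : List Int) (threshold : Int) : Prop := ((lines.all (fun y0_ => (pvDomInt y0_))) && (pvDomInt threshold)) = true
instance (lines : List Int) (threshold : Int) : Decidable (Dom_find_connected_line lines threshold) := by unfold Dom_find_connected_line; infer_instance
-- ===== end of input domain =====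

-- B replaces A's while-loop with its nested find_end index scan by a single
-- left-to-right pass that extends the current nonzero run or opens a new one
-- (objective: simpler; same two border trims, same centres).

-- ===== PORT A =====
-- inner `for j in range(start, length-1): if lines[j+1]==0: end=j; break` with default end=length-1
def pvFindEndAux (lines : List Int) : List Int → Int → Int
  | [], dflt => dflt
  | j :: js, dflt =>
      -- index j+1 is always in range here (j ∈ range(start, length-1)), so the default 0 is never used
      if PySem.List.pyGetD lines (j + 1) 0 = 0 then j else pvFindEndAux lines js dflt

def pvFindEnd (lines : List Int) (start : Int) : Int :=
  pvFindEndAux lines (PySem.List.pyRange start ((lines.length : Int) - 1) 1) ((lines.length : Int) - 1)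

-- termination helper for the while-loop: find_end start ≥ start
theorem pvFindEndAux_ge (lines : List Int) (s : Int) :
    ∀ (js : List Int) (dflt : Int), (∀ j ∈ js, s ≤ j) → s ≤ dflt →
      s ≤ pvFindEndAux lines js dflt := by
  intro js
  induction js with
  | nil => intro dflt _ hd; simpa [pvFindEndAux] using hd
  | cons j js ih =>
      intro dflt hmem hd
      simp only [pvFindEndAux]
      split
      · exact hmem j (by simp)
      · exact ih dflt (fun x hx => hmem x (by simp [hx])) hd

theorem pvFindEnd_ge (lines : List Int) (start : Int)
    (h : start ≤ (lines.length : Int) - 1) : start ≤ pvFindEnd lines start := by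
  refine pvFindEndAux_ge lines start _ _ (fun j hj => ?_) h
  exact ((PySem.List.mem_pyRange_one).1 hj).1

-- the `while i < length` loop building blocks
def pvLoopA (lines : List Int) (i : Int) : List (Int × Int) :=
  if h : i < (lines.length : Int) then
    if PySem.List.pyGetD lines i 0 = 0 then
      pvLoopA lines (i + 1)
    else
      let e := pvFindEnd lines i
      (i, e) :: pvLoopA lines (e + 1)
  else []
termination_by ((lines.length : Int) - i).toNat
decreasing_by
  · omega
  · have := pvFindEnd_ge lines i (by omega)
    omega

def find_connected_line (lines : List Int) (threshold : Int) : List Int :=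
  let length : Int := lines.length
  let blocks := pvLoopA lines 0
  -- if len(blocks) > 0: if blocks[0][0] <= threshold: blocks.pop(0)
  let blocks1 :=
    if 0 < blocks.length then
      (if (PySem.List.pyGetD blocks 0 ((0 : Int), (0 : Int))).1 ≤ threshold then blocks.tail else blocks)
    else blocks
  -- if len(blocks) > 0: if (length - blocks[-1][1]) <= threshold: blocks.pop(-1)
  let blocks2 :=
    if 0 < blocks1.length then
      (if length - (PySem.List.pyGetD blocks1 (-1) ((0 : Int), (0 : Int))).2 ≤ threshold then blocks1.dropLast else blocks1)
    else blocks1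
  -- int((x[0]+x[1])/2): exact as floor division since both endpoints are ≥ 0
  blocks2.map (fun x => PySem.Int.floordiv (x.1 + x.2) 2)

-- ===== PORT B =====
-- one fold step; blocks are kept back-to-front, Python's blocks[-1] is the head
def pvStepB (acc : Bool × List (Int × Int)) (p : Int × Int) : Bool × List (Int × Int) :=
  let prev := acc.1
  let blocks := acc.2
  let i := p.1
  let v := p.2
  if v ≠ 0 then
    (true,
      if prev then
        match blocks with
        | b :: rest => (b.1, i) :: rest   -- blocks[-1] = (blocks[-1][0], i)
        | [] => [(i, i)]                  -- unreachable: prev = true ⇒ blocks ≠ []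
      else (i, i) :: blocks)              -- blocks.append((i, i))
  else (false, blocks)

def find_connected_line_alt (lines : List Int) (threshold : Int) : List Int :=
  let blocks := (((PySem.List.enumerate lines 0).foldl pvStepB (false, [])).2).reverse
  -- if blocks and blocks[0][0] <= threshold: blocks = blocks[1:]
  let blocks1 :=
    if blocks ≠ [] ∧ (PySem.List.pyGetD blocks 0 ((0 : Int), (0 : Int))).1 ≤ threshold then
      PySem.List.slice blocks (some 1) none
    else blocks
  -- if blocks and len(lines) - blocks[-1][1] <= threshold: blocks = blocks[:-1]
  let blocks2 :=
    if blocks1 ≠ [] ∧ (lines.length : Int) - (PySem.List.pyGetD blocks1 (-1) ((0 : Int), (0 : Int))).2 ≤ threshold then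
      PySem.List.slice blocks1 none (some (-1))
    else blocks1
  blocks2.map (fun x => PySem.Int.floordiv (x.1 + x.2) 2)

-- ===== PRECONDITION & SPEC =====
def Spec_find_connected_line (lines : List Int) (threshold : Int) (out : List Int) : Prop := out = find_connected_line_alt lines threshold
instance (lines : List Int) (threshold : Int) (out : List Int) : Decidable (Spec_find_connected_line lines threshold out) := by unfold Spec_find_connected_line; infer_instance

-- ===== CLAIM (what is proved, stated in full; the proofs are below) =====
def Claim_equal_find_connected_line : Prop := ∀ (lines : List Int) (threshold : Int), Dom_find_connected_line lines threshold → Spec_find_connected_line lines threshold (find_connected_line lines threshold)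

-- ===== LEMMAS AND PROOFS =====

-- canonical run decomposition: pvRuns o i xs walks xs from absolute index i,
-- o = some s meaning a run started at s is open whose last nonzero index is i-1
def pvRuns : Option Int → Int → List Int → List (Int × Int)
  | none, _, [] => []
  | some s, i, [] => [(s, i - 1)]
  | none, i, x :: xs => if x = 0 then pvRuns none (i + 1) xs else pvRuns (some i) (i + 1) xs
  | some s, i, x :: xs => if x = 0 then (s, i - 1) :: pvRuns none (i + 1) xs else pvRuns (some s) (i + 1) xs

theorem pvRuns_some_eq (s : Int) :
    ∀ (ys : List Int) (i : Int),
      pvRuns (some s) i ys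
        = (s, i + ((ys.takeWhile (fun x => x ≠ 0)).length : Int) - 1)
            :: pvRuns none (i + ((ys.takeWhile (fun x => x ≠ 0)).length : Int))
                (ys.drop (ys.takeWhile (fun x => x ≠ 0)).length) := by
  intro ys
  induction ys with
  | nil => intro i; simp [pvRuns]
  | cons x xs ih =>
      intro i
      by_cases hx : x = 0
      · subst hx
        simp [pvRuns, List.takeWhile]
      · rw [show pvRuns (some s) i (x :: xs) = pvRuns (some s) (i + 1) xs by simp [pvRuns, hx]]
        rw [ih (i + 1)]
        simp [List.takeWhile, hx]
        constructor
        · ring_nf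
        · congr 1
          ring

theorem pvFindEndAux_eq (lines : List Int) :
    ∀ (n : Nat) (j : Int), 0 ≤ j → j ≤ (lines.length : Int) - 1 →
      (((lines.length : Int) - 1 - j).toNat = n) →
      pvFindEndAux lines (PySem.List.pyRange j ((lines.length : Int) - 1) 1) ((lines.length : Int) - 1)
        = j + (((lines.drop (j.toNat + 1)).takeWhile (fun x => x ≠ 0)).length : Int) := by
  intro n
  induction n using Nat.strong_induction_on with
  | _ n ih =>
    intro j h0 h1 hn
    by_cases hlt : j < (lines.length : Int) - 1
    · rw [PySem.List.pyRange_one_cons hlt]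
      have hj1 : (j + 1).toNat = j.toNat + 1 := by omega
      have hlen : j.toNat + 1 < lines.length := by omega
      have hget : PySem.List.pyGetD lines (j + 1) 0 = lines[j.toNat + 1] := by
        rw [PySem.List.pyGetD_eq_getElem lines (0 : Int) (by omega) (by omega)]
        simp [hj1]
      have hdrop : lines.drop (j.toNat + 1) = lines[j.toNat + 1] :: lines.drop (j.toNat + 2) :=
        List.drop_eq_getElem_cons hlen
      simp only [pvFindEndAux, hget, hdrop]
      by_cases hz : lines[j.toNat + 1] = 0
      · simp [hz]
      · rw [if_neg hz]
        have hrec := ih ((lines.length : Int) - 1 - (j + 1)).toNat (by omega) (j + 1)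
          (by omega) (by omega) rfl
        have h2 : (j + 1).toNat + 1 = j.toNat + 2 := by omega
        rw [hrec, h2, List.takeWhile_cons]
        simp [hz]
        ring
    · have hj : j = (lines.length : Int) - 1 := by omega
      have hrange : PySem.List.pyRange j ((lines.length : Int) - 1) 1 = [] := by
        simp [PySem.List.pyRange]; omega
      have hdrop : lines.drop (j.toNat + 1) = [] := by
        apply List.drop_eq_nil_of_le; omega
      rw [hrange, hdrop]
      simp [pvFindEndAux]
      omega

theorem pvLoopA_eq (lines : List Int) :
    ∀ (n : Nat) (i : Int), 0 ≤ i → (((lines.length : Int) - i).toNat = n) →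
      pvLoopA lines i = pvRuns none i (lines.drop i.toNat) := by
  intro n
  induction n using Nat.strong_induction_on with
  | _ n ih =>
    intro i h0 hn
    rw [pvLoopA]
    by_cases hlt : i < (lines.length : Int)
    · rw [dif_pos hlt]
      have hi : i.toNat < lines.length := by omega
      have hget : PySem.List.pyGetD lines i 0 = lines[i.toNat] :=
        PySem.List.pyGetD_eq_getElem lines 0 h0 (by omega)
      have hdrop : lines.drop i.toNat = lines[i.toNat] :: lines.drop (i.toNat + 1) :=
        List.drop_eq_getElem_cons hi
      rw [hget, hdrop]
      by_cases hz : lines[i.toNat] = 0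
      · rw [if_pos hz, hz]
        have hrec := ih ((lines.length : Int) - (i + 1)).toNat (by omega) (i + 1) (by omega) rfl
        rw [show ((i : Int) + 1).toNat = i.toNat + 1 from by omega] at hrec
        rw [hrec]
        simp [pvRuns]
      · rw [if_neg hz]
        have hfe : pvFindEnd lines i
            = i + (((lines.drop (i.toNat + 1)).takeWhile (fun x => x ≠ 0)).length : Int) :=
          pvFindEndAux_eq lines _ i h0 (by omega) rfl
        have hrec := ih ((lines.length : Int) - (pvFindEnd lines i + 1)).toNat
          (by rw [hfe]; omega) (pvFindEnd lines i + 1) (by rw [hfe]; omega) rfl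
        have htn : (pvFindEnd lines i + 1).toNat
            = i.toNat + 1 + ((lines.drop (i.toNat + 1)).takeWhile (fun x => x ≠ 0)).length := by
          rw [hfe]; omega
        rw [htn] at hrec
        dsimp only
        rw [show pvRuns none i (lines[i.toNat] :: lines.drop (i.toNat + 1))
              = pvRuns (some i) (i + 1) (lines.drop (i.toNat + 1)) from by simp [pvRuns, hz]]
        rw [pvRuns_some_eq, List.drop_drop, hrec, hfe]
        ring_nf
    · rw [dif_neg hlt]
      rw [List.drop_eq_nil_of_le (by omega)]
      simp [pvRuns]

theorem pvFoldB_eq (xs : List Int) :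
    ∀ (i : Int) (acc : List (Int × Int)),
      ((((PySem.List.enumerate xs i).foldl pvStepB (false, acc)).2).reverse
          = acc.reverse ++ pvRuns none i xs)
      ∧ ∀ s, ((((PySem.List.enumerate xs i).foldl pvStepB (true, (s, i - 1) :: acc)).2).reverse
          = acc.reverse ++ pvRuns (some s) i xs) := by
  induction xs with
  | nil =>
      intro i acc
      constructor
      · simp [PySem.List.enumerate_nil, pvRuns]
      · intro s; simp [PySem.List.enumerate_nil, pvRuns]
  | cons x xs ih =>
      intro i acc
      constructor
      · rw [PySem.List.enumerate_cons]
        simp only [List.foldl_cons]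
        by_cases hx : x = 0
        · subst hx
          rw [show pvStepB (false, acc) (i, 0) = (false, acc) by simp [pvStepB]]
          rw [show pvRuns none i (0 :: xs) = pvRuns none (i + 1) xs by simp [pvRuns]]
          exact (ih (i + 1) acc).1
        · rw [show pvStepB (false, acc) (i, x) = (true, (i, i) :: acc) by simp [pvStepB, hx]]
          rw [show pvRuns none i (x :: xs) = pvRuns (some i) (i + 1) xs by simp [pvRuns, hx]]
          have := (ih (i + 1) acc).2 i
          simpa using this
      · intro s
        rw [PySem.List.enumerate_cons]
        simp only [List.foldl_cons]
        by_cases hx : x = 0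
        · subst hx
          rw [show pvStepB (true, (s, i - 1) :: acc) (i, 0) = (false, (s, i - 1) :: acc) by simp [pvStepB]]
          rw [show pvRuns (some s) i (0 :: xs) = (s, i - 1) :: pvRuns none (i + 1) xs by simp [pvRuns]]
          have := (ih (i + 1) ((s, i - 1) :: acc)).1
          simpa using this
        · rw [show pvStepB (true, (s, i - 1) :: acc) (i, x) = (true, (s, i) :: acc) by simp [pvStepB, hx]]
          rw [show pvRuns (some s) i (x :: xs) = pvRuns (some s) (i + 1) xs by simp [pvRuns, hx]]
          have := (ih (i + 1) acc).2 s
          simpa using this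

theorem pvTrim1_eq (t : Int) (bl : List (Int × Int)) :
    (if 0 < bl.length then
        (if (PySem.List.pyGetD bl 0 ((0 : Int), (0 : Int))).1 ≤ t then bl.tail else bl)
      else bl)
    = (if bl ≠ [] ∧ (PySem.List.pyGetD bl 0 ((0 : Int), (0 : Int))).1 ≤ t then
        PySem.List.slice bl (some 1) none
      else bl) := by
  cases bl with
  | nil => simp
  | cons b bs =>
      simp only [PySem.List.slice_from_one]
      split_ifs with h1 h2 h3 <;> simp_all
      omega

theorem pvTrim2_eq (Lv t : Int) (bl : List (Int × Int)) :
    (if 0 < bl.length then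
        (if Lv - (PySem.List.pyGetD bl (-1) ((0 : Int), (0 : Int))).2 ≤ t then bl.dropLast else bl)
      else bl)
    = (if bl ≠ [] ∧ Lv - (PySem.List.pyGetD bl (-1) ((0 : Int), (0 : Int))).2 ≤ t then
        PySem.List.slice bl none (some (-1))
      else bl) := by
  cases bl with
  | nil => simp
  | cons b bs =>
      simp only [PySem.List.slice_to_neg_one]
      split_ifs with h1 h2 h3 <;> simp_all

-- ===== VERDICT (by name: the statement is the Claim_ definition above) =====
theorem find_connected_line_spec : Claim_equal_find_connected_line := by
  intro lines threshold _
  unfold Spec_find_connected_line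
  dsimp only [find_connected_line, find_connected_line_alt]
  have hA : pvLoopA lines 0 = pvRuns none 0 lines := by
    have h := pvLoopA_eq lines ((lines.length : Int) - 0).toNat 0 le_rfl rfl
    simpa using h
  have hB : (((PySem.List.enumerate lines 0).foldl pvStepB (false, [])).2).reverse
      = pvRuns none 0 lines := by
    have h := (pvFoldB_eq lines 0 []).1
    simpa using h
  rw [hA, ← hB, pvTrim1_eq, pvTrim2_eq]
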